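-- pv_equiv track=rewrite | github.com/forrestbao/autoscholar | preprocessing/hl_fulltext_align.py | complete_indexes
-- ===== SOURCE A (Python) =====
-- def complete_indexes(indexes, upper):
--     """OBSOLETE return the complete indexes, up to upper
--
--     Precondition: indexes are sorted after merge_sort_indexes
--
--     Also, this should be called after merge_with_gap to allow some
--     level of permission.
--
--     >>> complete_indexes([(1, 2), (3, 4), (5, 7)], 10)
--     [(0, 1), (2, 3), (4, 5), (7, 10)]
--     >>> complete_indexes([(1, 2), (3, 8)], 10)
--     [(0, 1), (2, 3), (8, 10)]
--
--     """
--
--     res = []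
--     if not indexes: return res
--     start = 0
--     for index in indexes:
--         if start < index[0]:
--             res.append((start, index[0]))
--         start = index[1]
--     if indexes[-1][1] < upper:
--         res.append((indexes[-1][1], upper))
--     return res
-- ===== SOURCE B (Python) =====
-- def complete_indexes(indexes, upper):
--     if not indexes:
--         return []
--     points = [0]
--     for a, b in indexes:
--         points.append(a)
--         points.append(b)
--     points.append(upper)
--     return [(s, e) for s, e in zip(points[0::2], points[1::2]) if s < e]
-- ===== Notes on version B (the rewrite author's own statement) =====
-- stated objective: alternative
-- what changed: Replaces A's running-start accumulator loop (with conditional appends and a separate trailing check) by building a flat boundary list [0, a1, b1, ..., an, bn, upper], pairing it with a strided zip, and filtering pairs with s < e.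
import Mathlib
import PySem

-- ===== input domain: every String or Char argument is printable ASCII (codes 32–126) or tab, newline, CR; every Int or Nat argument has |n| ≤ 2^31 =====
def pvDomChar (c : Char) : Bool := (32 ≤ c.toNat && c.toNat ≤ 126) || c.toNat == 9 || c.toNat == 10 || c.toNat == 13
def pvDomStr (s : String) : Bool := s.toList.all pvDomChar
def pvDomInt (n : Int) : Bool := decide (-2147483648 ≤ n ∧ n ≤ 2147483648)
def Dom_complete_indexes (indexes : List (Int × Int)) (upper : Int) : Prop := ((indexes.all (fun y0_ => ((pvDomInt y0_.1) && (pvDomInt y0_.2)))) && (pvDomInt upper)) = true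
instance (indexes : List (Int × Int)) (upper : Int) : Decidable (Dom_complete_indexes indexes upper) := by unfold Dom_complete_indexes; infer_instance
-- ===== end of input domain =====

-- B replaces A's running-start accumulator loop by a boundary-list + strided-zip + filter pass (alternative decomposition, same cost).


-- ===== PORT A =====
-- literal transliteration of A: fold over indexes with state (res, start),
-- then the trailing check via indexes[-1][1] (the list is nonempty on that branch, so getD is never used).
def complete_indexes (indexes : List (Int × Int)) (upper : Int) : List (Int × Int) :=
  if indexes = [] then []
  else
    let st := indexes.foldl
      (fun (st : List (Int × Int) × Int) (index : Int × Int) =>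
        ((if st.2 < index.1 then st.1 ++ [(st.2, index.1)] else st.1), index.2))
      ([], 0)
    let last := indexes.getLast?.getD (0, 0)
    if last.2 < upper then st.1 ++ [(last.2, upper)] else st.1

-- ===== PORT B =====
-- points[0::2] / points[1::2]: every second element of a list
def everyOther : List Int → List Int
  | [] => []
  | [x] => [x]
  | x :: _ :: rest => x :: everyOther rest

def complete_indexes_alt (indexes : List (Int × Int)) (upper : Int) : List (Int × Int) :=
  if indexes = [] then []
  else
    let points : List Int := 0 :: (indexes.flatMap (fun p => [p.1, p.2]) ++ [upper])
    ((everyOther points).zip (everyOther points.tail)).filter (fun p => p.1 < p.2)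

-- ===== PRECONDITION & SPEC =====
def Spec_complete_indexes (indexes : List (Int × Int)) (upper : Int) (out : List (Int × Int)) : Prop := out = complete_indexes_alt indexes upper
instance (indexes : List (Int × Int)) (upper : Int) (out : List (Int × Int)) : Decidable (Spec_complete_indexes indexes upper out) := by unfold Spec_complete_indexes; infer_instance

-- ===== CLAIM (what is proved, stated in full; the proofs are below) =====
def Claim_equal_complete_indexes : Prop := ∀ (indexes : List (Int × Int)) (upper : Int), Dom_complete_indexes indexes upper → Spec_complete_indexes indexes upper (complete_indexes indexes upper)

-- ===== LEMMAS AND PROOFS =====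

-- the gap list A's loop produces, recursively
def gaps (s : Int) : List (Int × Int) → List (Int × Int)
  | [] => []
  | (a, b) :: t => (if s < a then [(s, a)] else []) ++ gaps b t

-- the running start after the loop
def lastStart (s : Int) : List (Int × Int) → Int
  | [] => s
  | (_, b) :: t => lastStart b t

theorem foldl_gaps (l : List (Int × Int)) : ∀ (res : List (Int × Int)) (s : Int),
    l.foldl (fun (st : List (Int × Int) × Int) (index : Int × Int) =>
      ((if st.2 < index.1 then st.1 ++ [(st.2, index.1)] else st.1), index.2)) (res, s)
      = (res ++ gaps s l, lastStart s l) := by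
  induction l with
  | nil => simp [gaps, lastStart]
  | cons hd t ih =>
    intro res s
    obtain ⟨a, b⟩ := hd
    simp only [List.foldl_cons, gaps, lastStart]
    rw [ih]
    split_ifs with h <;> simp

theorem lastStart_getLast (l : List (Int × Int)) : ∀ (s : Int), l ≠ [] →
    lastStart s l = (l.getLast?.getD (0, 0)).2 := by
  induction l with
  | nil => simp
  | cons hd t ih =>
    intro s _
    obtain ⟨a, b⟩ := hd
    cases t with
    | nil => simp [lastStart]
    | cons hd' t' =>
      rw [show lastStart s ((a, b) :: hd' :: t') = lastStart b (hd' :: t') from rfl,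
          ih b (by simp), List.getLast?_cons_cons]

theorem zip_filter_eq (l : List (Int × Int)) : ∀ (s upper : Int),
    (((everyOther (s :: (l.flatMap (fun p => [p.1, p.2]) ++ [upper]))).zip
        (everyOther (l.flatMap (fun p => [p.1, p.2]) ++ [upper]))).filter
        (fun p => p.1 < p.2))
      = gaps s l ++ (if lastStart s l < upper then [(lastStart s l, upper)] else []) := by
  induction l with
  | nil =>
    intro s upper
    simp only [List.flatMap_nil, List.nil_append, everyOther, gaps, lastStart]
    by_cases h : s < upper <;> simp [List.zip, List.filter, h]
  | cons hd t ih =>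
    intro s upper
    obtain ⟨a, b⟩ := hd
    simp only [List.flatMap_cons, gaps, lastStart, List.cons_append, List.append_assoc]
    show (((everyOther (s :: a :: (b :: (t.flatMap (fun p => [p.1, p.2]) ++ [upper])))).zip
        (everyOther (a :: b :: (t.flatMap (fun p => [p.1, p.2]) ++ [upper])))).filter
        (fun p => p.1 < p.2)) = _
    rw [show everyOther (s :: a :: (b :: (t.flatMap (fun p => [p.1, p.2]) ++ [upper])))
          = s :: everyOther (b :: (t.flatMap (fun p => [p.1, p.2]) ++ [upper])) from rfl,
        show everyOther (a :: b :: (t.flatMap (fun p => [p.1, p.2]) ++ [upper]))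
          = a :: everyOther (t.flatMap (fun p => [p.1, p.2]) ++ [upper]) from rfl]
    rw [List.zip_cons_cons, List.filter_cons]
    rw [show (b :: (t.flatMap (fun p => [p.1, p.2]) ++ [upper]))
          = b :: (t.flatMap (fun p => [p.1, p.2]) ++ [upper]) from rfl]
    rw [ih b upper]
    by_cases h : s < a <;> simp [h]

-- ===== VERDICT (by name: the statement is the Claim_ definition above) =====
theorem complete_indexes_spec : Claim_equal_complete_indexes := by
  intro indexes upper _
  unfold Spec_complete_indexes complete_indexes complete_indexes_alt
  by_cases hne : indexes = []
  · simp [hne]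
  · simp only [hne, if_false]
    rw [foldl_gaps]
    simp only [List.nil_append, List.tail_cons]
    rw [zip_filter_eq, ← lastStart_getLast indexes 0 hne]
    split_ifs <;> simp
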